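-- pv_equiv track=rewrite | github.com/JustTekno58/deneme_justtech0n | SelsilPro_V6/on_hazirlik.py | parse_short_code
-- ===== SOURCE A (Python) =====
-- def parse_short_code(text):
--     if not text.startswith("01") or len(text) < 18: return text
--     gtin = text[2:16]; remainder = text[16:]
--     if remainder.startswith("21"):
--         serial_raw = remainder[2:]; cut_index = len(serial_raw)
--         for m in ["91", "92", "93", "11", "17"]:
--             idx = serial_raw.find(m)
--             if idx != -1 and idx < cut_index: cut_index = idx
--         return f"01{gtin}21{serial_raw[:cut_index]}"
--     return text
-- ===== SOURCE B (Python) =====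
-- def parse_short_code(text):
--     if not text.startswith("01") or len(text) < 18:
--         return text
--     gtin = text[2:16]
--     remainder = text[16:]
--     if not remainder.startswith("21"):
--         return text
--     serial_raw = remainder[2:]
--     markers = ("91", "92", "93", "11", "17")
--     cut = len(serial_raw)
--     for i in range(len(serial_raw)):
--         if serial_raw[i:i + 2] in markers:
--             cut = i
--             break
--     return f"01{gtin}21{serial_raw[:cut]}"
-- ===== Notes on version B (the rewrite author's own statement) =====
-- stated objective: alternative
-- what changed: Replaces the min-over-five-find() loop by a single left-to-right scan that stops at the first position whose two-character window is one of the markers, which is provably the same cut point.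
import Mathlib
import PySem

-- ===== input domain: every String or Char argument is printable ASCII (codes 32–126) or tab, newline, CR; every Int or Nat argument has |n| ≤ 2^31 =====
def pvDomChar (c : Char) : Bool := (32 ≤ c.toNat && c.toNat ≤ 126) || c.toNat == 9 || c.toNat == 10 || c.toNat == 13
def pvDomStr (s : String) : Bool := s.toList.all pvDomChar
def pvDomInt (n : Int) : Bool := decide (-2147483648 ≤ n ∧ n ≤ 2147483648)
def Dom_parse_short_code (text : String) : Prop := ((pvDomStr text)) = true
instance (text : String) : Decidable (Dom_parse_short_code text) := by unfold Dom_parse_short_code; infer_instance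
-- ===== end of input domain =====

-- B replaces A's min-over-five-find() loop by one left-to-right window scan; alternative decomposition, same result.

-- ===== PORT A =====
def parse_short_code (text : String) : String :=
  if ¬ PySem.Str.startswith text "01" ∨ (PySem.Str.len text : Int) < 18 then text
  else
    let gtin := PySem.Str.slice text (some 2) (some 16)
    let remainder := PySem.Str.slice text (some 16) none
    if PySem.Str.startswith remainder "21" then
      let serial_raw := PySem.Str.slice remainder (some 2) none
      let cut_index := List.foldl
        (fun c m =>
          let idx := PySem.Str.find serial_raw m
          if idx ≠ -1 ∧ idx < c then idx else c)
        ((PySem.Str.len serial_raw : Int)) ["91", "92", "93", "11", "17"]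
      "01" ++ gtin ++ "21" ++ PySem.Str.slice serial_raw none (some cut_index)
    else text

-- ===== PORT B =====
-- the marker tuple ("91","92","93","11","17") as character pairs
def pvMarkers : List (List Char) := [['9','1'], ['9','2'], ['9','3'], ['1','1'], ['1','7']]

-- the scan loop: first index whose two-char window is a marker, else the length
def cutScan : List Char → Nat
  | [] => 0
  | [_] => 1
  | a :: b :: t => if [a, b] ∈ pvMarkers then 0 else cutScan (b :: t) + 1

def parse_short_code_alt (text : String) : String :=
  if ¬ PySem.Str.startswith text "01" ∨ (PySem.Str.len text : Int) < 18 then text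
  else
    let gtin := PySem.Str.slice text (some 2) (some 16)
    let remainder := PySem.Str.slice text (some 16) none
    if ¬ PySem.Str.startswith remainder "21" then text
    else
      let serial := (PySem.Str.slice remainder (some 2) none).toList
      "01" ++ gtin ++ "21" ++ String.ofList (serial.take (cutScan serial))

-- ===== PRECONDITION & SPEC =====
def Spec_parse_short_code (text : String) (out : String) : Prop := out = parse_short_code_alt text
instance (text : String) (out : String) : Decidable (Spec_parse_short_code text out) := by unfold Spec_parse_short_code; infer_instance

-- ===== CLAIM (what is proved, stated in full; the proofs are below) =====
def Claim_equal_parse_short_code : Prop := ∀ (text : String), Dom_parse_short_code text → Spec_parse_short_code text (parse_short_code text)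

-- ===== LEMMAS AND PROOFS =====

def mstep (s : List Char) (c : Int) (m : List Char) : Int :=
  let idx := PySem.Chars.find s m
  if idx ≠ -1 ∧ idx < c then idx else c

def cutFold (s : List Char) : Int := List.foldl (mstep s) (s.length : Int) pvMarkers

theorem find_eq_zero_of_prefix (s m : List Char) (h : m <+: s) : PySem.Chars.find s m = 0 := by
  have hnn : 0 ≤ PySem.Chars.find s m := by
    rw [PySem.Chars.find_nonneg_iff]; exact h.isInfix
  obtain ⟨h1, h2⟩ := PySem.Chars.find_spec (s := s) (sub := m) hnn
  by_contra hne
  have hpos : 0 < (PySem.Chars.find s m).toNat := by omega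
  exact h2 0 hpos (by simpa using h)

theorem find_cons (c : Char) (s m : List Char) (hm : ¬ m <+: (c :: s)) :
    PySem.Chars.find (c :: s) m =
      if PySem.Chars.find s m = -1 then -1 else PySem.Chars.find s m + 1 := by
  by_cases h : PySem.Chars.find s m = -1
  · rw [if_pos h]
    rw [PySem.Chars.find_eq_neg_one_iff] at h ⊢
    intro hinf
    rcases List.infix_cons_iff.mp hinf with h1 | h2
    · exact hm h1
    · exact h h2
  · rw [if_neg h]
    have hnn : 0 ≤ PySem.Chars.find s m := by
      have := PySem.Chars.neg_one_le_find (s := s) (sub := m); omega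
    obtain ⟨h1, h2⟩ := PySem.Chars.find_spec (s := s) (sub := m) hnn
    set k : Nat := (PySem.Chars.find s m).toNat with hk
    have hfk : PySem.Chars.find s m = (k : Int) := by omega
    have hnn2 : 0 ≤ PySem.Chars.find (c :: s) m := by
      rw [PySem.Chars.find_nonneg_iff]
      rcases h1 with ⟨t, ht⟩
      exact ⟨(c :: s).take (k + 1), t, by
        simp only [List.take_succ_cons, List.cons_append, List.append_assoc, ht,
          List.take_append_drop]⟩
    obtain ⟨g1, g2⟩ := PySem.Chars.find_spec (s := c :: s) (sub := m) hnn2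
    set j : Nat := (PySem.Chars.find (c :: s) m).toNat with hj
    have hjk : j = k + 1 := by
      have hj0 : j ≠ 0 := by
        intro h0
        apply hm; have := g1; rw [h0] at this; simpa using this
      have hd : (c :: s).drop j = s.drop (j - 1) := by
        rcases Nat.exists_eq_succ_of_ne_zero hj0 with ⟨n, hn⟩
        rw [hn]; simp
      -- j - 1 ≥ k by minimality of k, and j ≤ k + 1 by minimality of j
      have hle1 : k ≤ j - 1 := by
        by_contra hlt
        exact h2 (j - 1) (by omega) (hd ▸ g1)
      have hle2 : j ≤ k + 1 := by
        by_contra hlt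
        apply g2 (k + 1) (by omega)
        have : (c :: s).drop (k + 1) = s.drop k := by simp
        rw [this]; exact h1
      omega
    omega

theorem mstep_shift (a : Char) (s : List Char) (m : List Char) (c : Int)
    (hc : 0 ≤ c) (hm : ¬ m <+: (a :: s)) :
    mstep (a :: s) (c + 1) m = mstep s c m + 1 := by
  have hf := find_cons a s m hm
  have hge := PySem.Chars.neg_one_le_find (s := s) (sub := m)
  simp only [mstep, hf]
  split_ifs <;> omega

theorem mstep_nonneg (s : List Char) (m : List Char) (c : Int) (hc : 0 ≤ c) :
    0 ≤ mstep s c m := by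
  have hge := PySem.Chars.neg_one_le_find (s := s) (sub := m)
  simp only [mstep]; split_ifs <;> omega

theorem fold_shift (ms : List (List Char)) (a : Char) (s : List Char) (c : Int)
    (hc : 0 ≤ c) (h : ∀ m ∈ ms, ¬ m <+: (a :: s)) :
    List.foldl (mstep (a :: s)) (c + 1) ms = List.foldl (mstep s) c ms + 1 := by
  induction ms generalizing c with
  | nil => simp
  | cons m ms ih =>
    simp only [List.foldl_cons]
    rw [mstep_shift a s m c hc (h m (by simp))]
    exact ih _ (mstep_nonneg s m c hc) (fun m' hm' => h m' (by simp [hm']))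

theorem find_short (s m : List Char) (h : s.length < m.length) :
    PySem.Chars.find s m = -1 := by
  rw [PySem.Chars.find_eq_neg_one_iff]
  intro hinf
  have := hinf.length_le
  omega

theorem cutFold_eq (s : List Char) : cutFold s = (cutScan s : Int) := by
  induction s with
  | nil =>
    simp [cutFold, cutScan, pvMarkers, List.foldl, mstep, find_short]
  | cons a s ih =>
    cases s with
    | nil =>
      have h91 := find_short [a] ['9','1'] (by simp)
      have h92 := find_short [a] ['9','2'] (by simp)
      have h93 := find_short [a] ['9','3'] (by simp)
      have h11 := find_short [a] ['1','1'] (by simp)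
      have h17 := find_short [a] ['1','7'] (by simp)
      simp [cutFold, cutScan, pvMarkers, List.foldl, mstep, h91, h92, h93, h11, h17]
    | cons b t =>
      by_cases hw : [a, b] ∈ pvMarkers
      · -- a marker is a prefix: its find is 0, so the fold reaches 0 and stays
        have hg1 := PySem.Chars.neg_one_le_find (s := a :: b :: t) (sub := ['9','1'])
        have hg2 := PySem.Chars.neg_one_le_find (s := a :: b :: t) (sub := ['9','2'])
        have hg3 := PySem.Chars.neg_one_le_find (s := a :: b :: t) (sub := ['9','3'])
        have hg4 := PySem.Chars.neg_one_le_find (s := a :: b :: t) (sub := ['1','1'])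
        have hg5 := PySem.Chars.neg_one_le_find (s := a :: b :: t) (sub := ['1','7'])
        have hz : PySem.Chars.find (a :: b :: t) [a, b] = 0 :=
          find_eq_zero_of_prefix _ _ ⟨t, rfl⟩
        have hcut : cutScan (a :: b :: t) = 0 := by simp only [cutScan, if_pos hw]
        rw [hcut]
        simp only [cutFold, pvMarkers, List.foldl, mstep, List.length_cons]
        simp only [pvMarkers, List.mem_cons, List.not_mem_nil, or_false] at hw
        rcases hw with h | h | h | h | h <;>
          (rw [h] at hz; push_cast; split_ifs <;> omega)
      · -- no marker is a prefix: every find shifts by one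
        have hpre : ∀ m ∈ pvMarkers, ¬ m <+: (a :: b :: t) := by
          intro m hm hp
          apply hw
          fin_cases hm <;>
            · rw [List.cons_prefix_cons] at hp
              obtain ⟨h1, hp⟩ := hp
              rw [List.cons_prefix_cons] at hp
              obtain ⟨h2, _⟩ := hp
              simp [← h1, ← h2, pvMarkers]
        have hstep : cutFold (a :: b :: t) = cutFold (b :: t) + 1 := by
          have h := fold_shift pvMarkers a (b :: t) ((b :: t).length : Int)
            (by positivity) hpre
          unfold cutFold
          have hlen : (((a :: b :: t).length : Nat) : Int) = ((b :: t).length : Int) + 1 := by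
            simp
          rw [hlen, h]
        rw [hstep, ih, cutScan, if_neg hw]
        push_cast; ring

theorem string_eq_of_toList {s t : String} (h : s.toList = t.toList) : s = t := by
  have := congrArg String.ofList h
  simpa using this

theorem strFold_eq (serial : String) :
    List.foldl
      (fun c m =>
        let idx := PySem.Str.find serial m
        if idx ≠ -1 ∧ idx < c then idx else c)
      ((PySem.Str.len serial : Int)) ["91", "92", "93", "11", "17"]
      = ((cutScan serial.toList : Nat) : Int) := by
  rw [← cutFold_eq]
  have e1 : ("91" : String).toList = ['9','1'] := by decide
  have e2 : ("92" : String).toList = ['9','2'] := by decide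
  have e3 : ("93" : String).toList = ['9','3'] := by decide
  have e4 : ("11" : String).toList = ['1','1'] := by decide
  have e5 : ("17" : String).toList = ['1','7'] := by decide
  simp only [cutFold, pvMarkers, mstep, List.foldl_cons, List.foldl_nil,
    PySem.Str.find_eq, PySem.Str.len_eq, e1, e2, e3, e4, e5]

theorem slice_take (s : String) (n : Nat) :
    PySem.Str.slice s none (some (n : Int)) = String.ofList (s.toList.take n) := by
  apply string_eq_of_toList
  rw [PySem.Str.toList_slice]
  simp [PySem.Chars.slice_eq_listSlice, PySem.List.slice_to_natCast]

-- ===== VERDICT (by name: the statement is the Claim_ definition above) =====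
theorem parse_short_code_spec : Claim_equal_parse_short_code := by
  intro text _
  unfold Spec_parse_short_code
  simp only [parse_short_code, parse_short_code_alt]
  by_cases h1 : ¬ PySem.Str.startswith text "01" ∨ (PySem.Str.len text : Int) < 18
  · rw [if_pos h1, if_pos h1]
  · rw [if_neg h1, if_neg h1]
    by_cases h2 : PySem.Str.startswith (PySem.Str.slice text (some 16) none) "21"
    · rw [if_pos h2, if_neg (not_not_intro h2)]
      rw [strFold_eq, slice_take]
    · rw [if_neg h2, if_pos h2]
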